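-- pv_equiv track=rewrite | github.com/JoeBoh71/KISYSTEM | agents/fixer_agent.py | _validate_cuda_syntax
-- ===== SOURCE A (Python) =====
-- def _validate_cuda_syntax(code: str, language: str) -> str:
--     """
--     Validate and fix CUDA syntax issues.
--
--     NOTE: This is now redundant with pattern-based fixes,
--     but kept for backward compatibility.
--     """
--     if language.lower() not in ['cuda', 'cu', 'cpp', 'c++', 'c']:
--         return code
--
--     lines = code.split('\n')
--     fixed_lines = []
--
--     # Valid preprocessor directives
--     valid_directives = (
--         '#include', '#define', '#pragma', '#ifndef',
--         '#ifdef', '#endif', '#if', '#else', '#elif', '#undef'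
--     )
--
--     for line in lines:
--         stripped = line.lstrip()
--
--         # Preserve valid preprocessor directives
--         if stripped.startswith(valid_directives):
--             fixed_lines.append(line)
--             continue
--
--         # Convert invalid # comments to // comments
--         if stripped.startswith('#'):
--             fixed_line = line.replace('#', '//', 1)
--             fixed_lines.append(fixed_line)
--         else:
--             fixed_lines.append(line)
--
--     return '\n'.join(fixed_lines)
-- ===== SOURCE B (Python) =====
-- import re
--
-- # One regex substitution over the whole text (MULTILINE) instead of split/loop/join.
-- _INVALID_HASH = re.compile(
--     r'^(\s*)#(?!include|define|pragma|if|endif|else|elif|undef)', re.MULTILINE)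
--
--
-- def _validate_cuda_syntax(code: str, language: str) -> str:
--     if language.lower() not in ['cuda', 'cu', 'cpp', 'c++', 'c']:
--         return code
--     return _INVALID_HASH.sub(r'\1//', code)
-- ===== Notes on version B (the rewrite author's own statement) =====
-- stated objective: idiomatic
-- what changed: Replaces A's split-into-lines / per-line lstrip+startswith fix / join loop with a single MULTILINE regex substitution over the whole text (one left-to-right scan with a negative lookahead for the valid directive prefixes).
import Mathlib
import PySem

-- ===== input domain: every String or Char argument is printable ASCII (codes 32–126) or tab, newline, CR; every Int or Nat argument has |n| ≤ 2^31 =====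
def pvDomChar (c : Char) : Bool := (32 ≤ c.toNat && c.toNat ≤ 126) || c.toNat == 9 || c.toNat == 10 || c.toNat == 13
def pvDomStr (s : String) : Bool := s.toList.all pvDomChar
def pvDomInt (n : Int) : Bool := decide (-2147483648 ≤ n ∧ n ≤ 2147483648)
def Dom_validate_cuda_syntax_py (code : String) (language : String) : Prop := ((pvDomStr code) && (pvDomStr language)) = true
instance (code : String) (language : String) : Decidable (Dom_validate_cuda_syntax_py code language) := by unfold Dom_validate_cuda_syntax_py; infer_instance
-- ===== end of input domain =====

-- B replaces A's split-lines / fix-each-line / join loop by one regex-style left-to-right scan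
-- of the whole text (re.sub with MULTILINE in Python); objective: idiomatic.


-- ===== PORT A =====
-- valid_directives tuple
def pvDirectives : List (List Char) :=
  ["#include".toList, "#define".toList, "#pragma".toList, "#ifndef".toList,
   "#ifdef".toList, "#endif".toList, "#if".toList, "#else".toList, "#elif".toList, "#undef".toList]

-- line.replace('#', '//', 1): hand port (PySem.Chars.replace has no count); exact for a
-- single-char pattern — replaces the first '#' only.
def pvReplaceOnceA : List Char → List Char
  | [] => []
  | c :: cs => if c = '#' then '/' :: '/' :: cs else c :: pvReplaceOnceA cs

-- the body of A's per-line loop (append one fixed line)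
def pvFixLineA (line : List Char) : List Char :=
  let stripped := PySem.Chars.lstrip line
  if pvDirectives.any (fun d => PySem.Chars.startswith stripped d) then line
  else if PySem.Chars.startswith stripped ['#'] then pvReplaceOnceA line
  else line

def validate_cuda_syntax_py (code : String) (language : String) : String :=
  if !(["cuda", "cu", "cpp", "c++", "c"].contains (PySem.Str.lower language)) then code
  else
    let lines := PySem.Chars.splitOn code.toList ['\n']
    let fixed_lines := lines.map pvFixLineA
    String.mk (PySem.Chars.join ['\n'] fixed_lines)

-- ===== PORT B =====
-- Source B does one re.sub(r'^(\s*)#(?!include|…|undef)', r'\1//', code, MULTILINE).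
-- Hand port of that substitution (PySem has no regex): a left-to-right scan with two states —
-- pvScanStart: at '^' / inside the '\s*' run (whitespace, including '\n', keeps this state;
-- a '#' not followed by a directive word becomes '//'); pvScanRest: past the match position,
-- copy until '\n' restarts pvScanStart. Exact for this regex on the ASCII domain.
def pvDirWords : List (List Char) :=
  ["include".toList, "define".toList, "pragma".toList, "if".toList,
   "endif".toList, "else".toList, "elif".toList, "undef".toList]

-- the negative lookahead
def pvIsDir (cs : List Char) : Bool := pvDirWords.any (fun w => w.isPrefixOf cs)

mutual
def pvScanStart : List Char → List Char
  | [] => []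
  | c :: cs =>
    if PySem.Chars.isspace c then c :: pvScanStart cs
    else if c = '#' ∧ ¬ pvIsDir cs then '/' :: '/' :: pvScanRest cs
    else c :: pvScanRest cs
def pvScanRest : List Char → List Char
  | [] => []
  | c :: cs => if c = '\n' then c :: pvScanStart cs else c :: pvScanRest cs
end

def validate_cuda_syntax_py_alt (code : String) (language : String) : String :=
  if !(["cuda", "cu", "cpp", "c++", "c"].contains (PySem.Str.lower language)) then code
  else String.mk (pvScanStart code.toList)

-- ===== PRECONDITION & SPEC =====
def Spec_validate_cuda_syntax_py (code : String) (language : String) (out : String) : Prop := out = validate_cuda_syntax_py_alt code language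
instance (code : String) (language : String) (out : String) : Decidable (Spec_validate_cuda_syntax_py code language out) := by unfold Spec_validate_cuda_syntax_py; infer_instance

-- ===== CLAIM (what is proved, stated in full; the proofs are below) =====
def Claim_equal_validate_cuda_syntax_py : Prop := ∀ (code : String) (language : String), Dom_validate_cuda_syntax_py code language → Spec_validate_cuda_syntax_py code language (validate_cuda_syntax_py code language)

-- ===== LEMMAS AND PROOFS =====

-- structural characterisation of code.split('\n')
def pvLinesAux (pre : List Char) : List Char → List (List Char)
  | [] => [pre]
  | c :: cs => if c = '\n' then pre :: pvLinesAux [] cs else pvLinesAux (pre ++ [c]) cs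

theorem pv_go_spec : ∀ (fuel : Nat) (l cur : List Char) (acc : List (List Char)),
    l.length < fuel →
    PySem.Chars.splitOn.go ['\n'] fuel l cur acc = acc.reverse ++ pvLinesAux cur.reverse l := by
  intro fuel
  induction fuel with
  | zero => intro l cur acc h; omega
  | succ fuel ih =>
    intro l cur acc h
    cases l with
    | nil => simp [PySem.Chars.splitOn.go, pvLinesAux]
    | cons c rest =>
      by_cases hc : c = '\n'
      · subst hc
        rw [PySem.Chars.splitOn.go]
        simp only [List.isPrefixOf, beq_self_eq_true, List.length_cons, List.drop_succ_cons, List.drop_zero,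
          List.length_nil]
        rw [ih _ _ _ (by simpa using Nat.lt_of_succ_lt_succ h)]
        simp [pvLinesAux]
      · rw [PySem.Chars.splitOn.go]
        simp only [List.isPrefixOf]
        rw [if_neg (by simp; exact fun h => hc h.symm)]
        rw [ih _ _ _ (by simpa using Nat.lt_of_succ_lt_succ h)]
        simp [pvLinesAux, hc]

theorem pv_splitOn_eq (cs : List Char) :
    PySem.Chars.splitOn cs ['\n'] = pvLinesAux [] cs := by
  unfold PySem.Chars.splitOn
  rw [pv_go_spec _ _ _ _ (by omega)]
  simp

theorem pv_linesAux_ne (pre cs : List Char) : pvLinesAux pre cs ≠ [] := by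
  induction cs generalizing pre with
  | nil => simp [pvLinesAux]
  | cons c cs ih =>
    by_cases hc : c = '\n' <;> simp [pvLinesAux, hc, ih]

theorem pv_linesAux_no_nl (cs : List Char) : ∀ (pre : List Char), '\n' ∉ pre →
    ∀ l ∈ pvLinesAux pre cs, '\n' ∉ l := by
  induction cs with
  | nil => intro pre hp; simp [pvLinesAux]; exact hp
  | cons c cs ih =>
    intro pre hp
    by_cases hc : c = '\n'
    · subst hc
      rw [show pvLinesAux pre ('\n' :: cs) = pre :: pvLinesAux [] cs from by simp [pvLinesAux]]
      intro l hl
      rcases List.mem_cons.mp hl with rfl | hl2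
      · exact hp
      · exact ih [] (by simp) l hl2
    · simp only [pvLinesAux, if_neg hc]
      exact ih (pre ++ [c]) (by simp [hp]; exact fun h => hc h.symm)

theorem pv_join_linesAux (cs : List Char) : ∀ (pre : List Char),
    PySem.Chars.join ['\n'] (pvLinesAux pre cs) = pre ++ cs := by
  induction cs with
  | nil => intro pre; simp [pvLinesAux, PySem.Chars.join, List.intercalate]
  | cons c cs ih =>
    intro pre
    by_cases hc : c = '\n'
    · subst hc
      obtain ⟨l, ls, hl⟩ : ∃ l ls, pvLinesAux ([] : List Char) cs = l :: ls := by
        cases hq : pvLinesAux ([] : List Char) cs with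
        | nil => exact absurd hq (pv_linesAux_ne _ _)
        | cons a b => exact ⟨a, b, rfl⟩
      have hj := ih ([] : List Char)
      rw [hl] at hj
      simp only [List.nil_append] at hj
      rw [show pvLinesAux pre ('\n' :: cs) = pre :: pvLinesAux [] cs from by simp [pvLinesAux],
        hl, PySem.Chars.join_cons_cons, hj]
      simp
    · simp only [pvLinesAux, if_neg hc]
      rw [ih (pre ++ [c])]
      simp

theorem pv_scanRest_append (cs : List Char) (h : '\n' ∉ cs) (r : List Char) :
    pvScanRest (cs ++ r) = cs ++ pvScanRest r := by
  induction cs with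
  | nil => simp
  | cons c cs ih =>
    simp only [List.mem_cons, not_or] at h
    simp [pvScanRest, ih h.2]; exact fun hh => (h.1 hh.symm).elim

set_option maxHeartbeats 1000000 in
theorem pv_dir_cons (c : Char) (cs : List Char) :
    pvDirectives.any (fun d => PySem.Chars.startswith (c :: cs) d) = ((c == '#') && pvIsDir cs) := by
  have h1 : ∀ (w : List Char), PySem.Chars.startswith (c :: cs) ('#' :: w)
      = ((c == '#') && w.isPrefixOf cs) := by
    intro w
    simp [PySem.Chars.startswith, List.isPrefixOf, BEq.comm]
  have e1 : "#include".toList = '#' :: "include".toList := rfl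
  have e2 : "#define".toList = '#' :: "define".toList := rfl
  have e3 : "#pragma".toList = '#' :: "pragma".toList := rfl
  have e4 : "#ifndef".toList = '#' :: "ifndef".toList := rfl
  have e5 : "#ifdef".toList = '#' :: "ifdef".toList := rfl
  have e6 : "#endif".toList = '#' :: "endif".toList := rfl
  have e7 : "#if".toList = '#' :: "if".toList := rfl
  have e8 : "#else".toList = '#' :: "else".toList := rfl
  have e9 : "#elif".toList = '#' :: "elif".toList := rfl
  have e10 : "#undef".toList = '#' :: "undef".toList := rfl
  simp only [pvDirectives, pvIsDir, pvDirWords, List.any_cons, List.any_nil,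
    e1, e2, e3, e4, e5, e6, e7, e8, e9, e10, h1, Bool.or_false]
  cases hc : (c == '#') with
  | false => simp
  | true =>
    simp only [Bool.true_and]
    apply Bool.eq_iff_iff.mpr
    simp only [Bool.or_eq_true, List.isPrefixOf_iff_prefix]
    have hnd : "ifndef".toList <+: cs → "if".toList <+: cs :=
      fun h => List.IsPrefix.trans (by decide) h
    have hd : "ifdef".toList <+: cs → "if".toList <+: cs :=
      fun h => List.IsPrefix.trans (by decide) h
    constructor
    · rintro (h|h|h|h|h|h|h|h|h|h)
      · exact Or.inl (h)
      · exact Or.inr (Or.inl (h))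
      · exact Or.inr (Or.inr (Or.inl (h)))
      · exact Or.inr (Or.inr (Or.inr (Or.inl (hnd h))))
      · exact Or.inr (Or.inr (Or.inr (Or.inl (hd h))))
      · exact Or.inr (Or.inr (Or.inr (Or.inr (Or.inl (h)))))
      · exact Or.inr (Or.inr (Or.inr (Or.inl (h))))
      · exact Or.inr (Or.inr (Or.inr (Or.inr (Or.inr (Or.inl (h))))))
      · exact Or.inr (Or.inr (Or.inr (Or.inr (Or.inr (Or.inr (Or.inl (h)))))))
      · exact Or.inr (Or.inr (Or.inr (Or.inr (Or.inr (Or.inr (Or.inr (h)))))))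
    · rintro (h|h|h|h|h|h|h|h)
      · exact Or.inl (h)
      · exact Or.inr (Or.inl (h))
      · exact Or.inr (Or.inr (Or.inl (h)))
      · exact Or.inr (Or.inr (Or.inr (Or.inr (Or.inr (Or.inr (Or.inl (h)))))))
      · exact Or.inr (Or.inr (Or.inr (Or.inr (Or.inr (Or.inl (h))))))
      · exact Or.inr (Or.inr (Or.inr (Or.inr (Or.inr (Or.inr (Or.inr (Or.inl (h))))))))
      · exact Or.inr (Or.inr (Or.inr (Or.inr (Or.inr (Or.inr (Or.inr (Or.inr (Or.inl (h)))))))))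
      · exact Or.inr (Or.inr (Or.inr (Or.inr (Or.inr (Or.inr (Or.inr (Or.inr (Or.inr (h)))))))))

theorem pv_fix_cons_ws (c : Char) (cs : List Char) (hc : PySem.Chars.isspace c = true) :
    pvFixLineA (c :: cs) = c :: pvFixLineA cs := by
  have hcn : c ≠ '#' := by
    intro h; rw [h] at hc; exact absurd hc (by decide)
  have hs : PySem.Chars.lstrip (c :: cs) = PySem.Chars.lstrip cs := by
    simp [PySem.Chars.lstrip, List.dropWhile, hc]
  have hro : pvReplaceOnceA (c :: cs) = c :: pvReplaceOnceA cs := by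
    simp [pvReplaceOnceA, hcn]
  simp only [pvFixLineA, hs]
  split_ifs <;> simp [hro]

theorem pv_prefix_ext (w : List Char) : ∀ (cs r : List Char), '\n' ∉ w →
    (r = [] ∨ r.head? = some '\n') → w.isPrefixOf (cs ++ r) = w.isPrefixOf cs := by
  induction w with
  | nil => intro cs r _ _; simp
  | cons a w ih =>
    intro cs r hw hr
    have ha : a ≠ '\n' := fun e => hw (e ▸ List.mem_cons_self)
    have hw' : '\n' ∉ w := fun m => hw (List.mem_cons_of_mem _ m)
    cases cs with
    | nil =>
      rcases hr with rfl | hr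
      · simp
      · cases r with
        | nil => simp at hr
        | cons b r' =>
          simp only [Option.some.injEq, List.head?_cons] at hr
          subst hr
          simp only [List.nil_append, List.isPrefixOf]
          have : (a == '\n') = false := by simpa using ha
          simp [this]
    | cons b cs' =>
      simp only [List.cons_append, List.isPrefixOf]
      rw [ih cs' r hw' hr]

theorem pv_isDir_ext (cs r : List Char) (hr : r = [] ∨ r.head? = some '\n') :
    pvIsDir (cs ++ r) = pvIsDir cs := by
  simp only [pvIsDir, pvDirWords, List.any_cons, List.any_nil]
  rw [pv_prefix_ext "include".toList cs r (by decide) hr,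
    pv_prefix_ext "define".toList cs r (by decide) hr,
    pv_prefix_ext "pragma".toList cs r (by decide) hr,
    pv_prefix_ext "if".toList cs r (by decide) hr,
    pv_prefix_ext "endif".toList cs r (by decide) hr,
    pv_prefix_ext "else".toList cs r (by decide) hr,
    pv_prefix_ext "elif".toList cs r (by decide) hr,
    pv_prefix_ext "undef".toList cs r (by decide) hr]

theorem pv_scan_line (line : List Char) (r : List Char) (h : '\n' ∉ line)
    (hr : r = [] ∨ r.head? = some '\n') :
    pvScanStart (line ++ r) = pvFixLineA line ++ pvScanRest r := by
  induction line with
  | nil =>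
    rw [show pvFixLineA [] = [] from rfl, List.nil_append, List.nil_append]
    rcases hr with rfl | hr
    · rfl
    · cases r with
      | nil => rfl
      | cons b r' =>
        simp only [Option.some.injEq, List.head?_cons] at hr
        subst hr
        simp [pvScanStart, pvScanRest, show PySem.Chars.isspace '\n' = true from by decide]
  | cons c cs ih =>
    have h' : '\n' ∉ cs := fun m => h (List.mem_cons_of_mem _ m)
    have hcn : c ≠ '\n' := fun e => h (e ▸ List.mem_cons_self)
    rw [List.cons_append]
    by_cases hws : PySem.Chars.isspace c = true
    · rw [show pvScanStart (c :: (cs ++ r)) = c :: pvScanStart (cs ++ r) from by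
        simp [pvScanStart, hws]]
      rw [ih h', pv_fix_cons_ws c cs hws]
      simp
    · have hwsf : PySem.Chars.isspace c = false := by simpa using hws
      have hls : PySem.Chars.lstrip (c :: cs) = c :: cs := by
        simp [PySem.Chars.lstrip, List.dropWhile, hwsf]
      have hsw : PySem.Chars.startswith (c :: cs) ['#'] = (c == '#') := by
        simp only [PySem.Chars.startswith, List.isPrefixOf,
          Bool.and_true]
        simp [BEq.comm]
      rw [show pvScanStart (c :: (cs ++ r)) =
          if c = '#' ∧ ¬ pvIsDir (cs ++ r) = true then '/' :: '/' :: pvScanRest (cs ++ r)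
          else c :: pvScanRest (cs ++ r) from by
            simp [pvScanStart, hwsf]]
      rw [pv_isDir_ext cs r hr, pv_scanRest_append cs h' r]
      simp only [pvFixLineA, hls, pv_dir_cons, hsw]
      by_cases hch : c = '#'
      · subst hch
        cases hdir : pvIsDir cs with
        | false => simp [pvReplaceOnceA]
        | true => simp
      · have : (c == '#') = false := by simpa using hch
        simp [this, hch]

theorem pv_scan_join (lines : List (List Char)) (hne : lines ≠ [])
    (h : ∀ l ∈ lines, '\n' ∉ l) :
    pvScanStart (PySem.Chars.join ['\n'] lines) = PySem.Chars.join ['\n'] (lines.map pvFixLineA) := by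
  induction lines with
  | nil => exact absurd rfl hne
  | cons l ls ih =>
    have hl : '\n' ∉ l := h l (List.mem_cons_self)
    cases ls with
    | nil =>
      rw [PySem.Chars.join_singleton, List.map_singleton, PySem.Chars.join_singleton]
      have := pv_scan_line l [] hl (Or.inl rfl)
      simpa [pvScanRest] using this
    | cons l2 t =>
      rw [PySem.Chars.join_cons_cons, List.map_cons, List.map_cons, PySem.Chars.join_cons_cons]
      have hrest := ih (by simp) (fun x hx => h x (List.mem_cons_of_mem _ hx))
      have hstep := pv_scan_line l ('\n' :: PySem.Chars.join ['\n'] (l2 :: t)) hl (Or.inr rfl)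
      rw [show l ++ ['\n'] ++ PySem.Chars.join ['\n'] (l2 :: t)
          = l ++ ('\n' :: PySem.Chars.join ['\n'] (l2 :: t)) from by simp, hstep]
      rw [show pvScanRest ('\n' :: PySem.Chars.join ['\n'] (l2 :: t))
          = '\n' :: pvScanStart (PySem.Chars.join ['\n'] (l2 :: t)) from by simp [pvScanRest]]
      rw [hrest, ← List.map_cons]
      simp

-- ===== VERDICT (by name: the statement is the Claim_ definition above) =====
theorem validate_cuda_syntax_py_spec : Claim_equal_validate_cuda_syntax_py := by
  intro code language _
  unfold Spec_validate_cuda_syntax_py validate_cuda_syntax_py validate_cuda_syntax_py_alt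
  split_ifs with hg
  · rfl
  · have h1 := pv_scan_join (pvLinesAux [] code.toList) (pv_linesAux_ne _ _)
      (pv_linesAux_no_nl code.toList [] (by simp))
    rw [pv_join_linesAux code.toList [] ] at h1
    simp only [List.nil_append] at h1
    show String.mk (PySem.Chars.join ['\n'] ((PySem.Chars.splitOn code.toList ['\n']).map pvFixLineA)) = String.mk (pvScanStart code.toList)
    rw [pv_splitOn_eq code.toList, ← h1]
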